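-- pv_equiv track=rewrite | github.com/Aryudesu/ABC | ABC/300_399/376/D.py | calc
-- ===== SOURCE A (Python) =====
-- def calc(N, graph):
--     memo = [False] * N
--     nodes = set()
--     nodes.add(0)
--     result = 0
--     while nodes:
--         new_nodes = set()
--         for node in nodes:
--             gh = graph.get(node, [])
--             for g in gh:
--                 if memo[g]:
--                     continue
--                 memo[g] = True
--                 new_nodes.add(g)
--         result += 1
--         if 0 in new_nodes:
--             return result
--         nodes = new_nodes
--     return -1
-- ===== SOURCE B (Python) =====
-- def calc(N, graph):
--     # Synchronous Bellman-Ford: relax every edge of the whole graph per round (reading the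
--     # previous round's table, writing a fresh one) until a fixpoint or N rounds, then answer
--     # with the best edge leading back into node 0.  No BFS frontier/queue is maintained.
--     dist = {0: 0}
--     for _ in range(N):
--         new = dict(dist)
--         for u, vs in graph.items():
--             if u in dist:
--                 du1 = dist[u] + 1
--                 for v in vs:
--                     if v not in new or du1 < new[v]:
--                         new[v] = du1
--         if new == dist:
--             break
--         dist = new
--     best = -1
--     for u, vs in graph.items():
--         if 0 in vs and u in dist:
--             c = dist[u] + 1
--             if best == -1 or c < best:
--                 best = c
--     return best
-- ===== Notes on version B (the rewrite author's own statement) =====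
-- stated objective: alternative
-- what changed: Replaces A's BFS (level-by-level frontier sets with a visited array) by synchronous Bellman-Ford: whole-graph edge relaxation of a distance table, reading the previous round's table and writing a fresh one, until a fixpoint or N rounds, then one scan taking the minimum dist[u]+1 over edges u->0; no frontier, queue or visited structure exists.
-- outside the precondition, e.g. on calc(2, {0: [-1, 1], 1: [0]}): A returns -1, B returns 2; on calc(2, {0: [1], 1: [], 3: [9]}): A returns -1, B returns -1
import Mathlib
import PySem

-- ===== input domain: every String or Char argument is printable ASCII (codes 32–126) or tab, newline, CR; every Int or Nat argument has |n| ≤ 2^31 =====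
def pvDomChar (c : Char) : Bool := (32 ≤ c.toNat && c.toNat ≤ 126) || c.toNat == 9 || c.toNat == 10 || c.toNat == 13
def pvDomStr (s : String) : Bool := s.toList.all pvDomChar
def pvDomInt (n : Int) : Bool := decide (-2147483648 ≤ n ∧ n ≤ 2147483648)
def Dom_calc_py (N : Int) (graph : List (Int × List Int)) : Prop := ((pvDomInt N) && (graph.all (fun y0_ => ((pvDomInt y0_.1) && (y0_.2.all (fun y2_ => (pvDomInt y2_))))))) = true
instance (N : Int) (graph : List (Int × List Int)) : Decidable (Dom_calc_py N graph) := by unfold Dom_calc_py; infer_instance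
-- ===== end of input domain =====

-- B replaces A's level-by-level frontier BFS by synchronous Bellman-Ford relaxation: whole-graph
-- edge-relaxation rounds over a distance table until a fixpoint (at most N rounds), then one scan
-- taking the minimum dist[u]+1 over edges u->0 (objective: alternative algorithm, same result).
-- A's iteration over the Python set `nodes` is ported in insertion order; the returned value does
-- not depend on that order.

-- ===== PORT A =====
-- inner `for g in gh` body: skip if memo[g], else mark and add to new_nodes
-- (the pyGetD default `true` is the skip branch; it is only reached where Python raises IndexError,
--  which Pre_ excludes)
def calcAStep (st : List Bool × List Int) (g : Int) : List Bool × List Int :=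
  if PySem.List.pyGetD st.1 g true = true then st
  else (PySem.List.pySetD st.1 g true, PySem.Set.add st.2 g)

-- `for node in nodes` body
def calcANode (gd : PySem.Dict Int (List Int)) (st : List Bool × List Int) (node : Int) :
    List Bool × List Int :=
  (gd.getD node []).foldl calcAStep st

-- `while nodes:` — fuel-guarded for totality; under Pre_ the fuel never runs out
def calcALoop (gd : PySem.Dict Int (List Int)) : Nat → List Bool → List Int → Int → Int
  | 0, _, _, _ => -1
  | fuel+1, memo, nodes, result =>
    if nodes = [] then -1
    else
      let st := nodes.foldl (calcANode gd) (memo, (PySem.Set.empty : PySem.Set Int))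
      if PySem.Set.contains st.2 0 then result + 1
      else calcALoop gd fuel st.1 st.2 (result + 1)

def calc_py (N : Int) (graph : List (Int × List Int)) : Int :=
  calcALoop (PySem.Dict.ofList graph) (N.toNat + 2)
    (List.replicate N.toNat false) (PySem.Set.add PySem.Set.empty 0) 0

-- ===== PORT B =====
-- `for v in vs` body: `if v not in new or du1 < new[v]: new[v] = du1`
-- (`new[v]` on the right is only read when `v in new`, so the getD default is never the value used)
def calcBRelax1 (du1 : Int) (nw : PySem.Dict Int Int) (v : Int) : PySem.Dict Int Int :=
  if ¬ nw.contains v = true ∨ du1 < nw.getD v 0 then nw.insert v du1 else nw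

def calcBRelax (du1 : Int) (nw : PySem.Dict Int Int) (vs : List Int) : PySem.Dict Int Int :=
  vs.foldl (calcBRelax1 du1) nw

-- `for u, vs in graph.items(): if u in dist: …` body
def calcBItem (dist : PySem.Dict Int Int) (nw : PySem.Dict Int Int) (p : Int × List Int) :
    PySem.Dict Int Int :=
  match dist.get? p.1 with
  | none => nw
  | some du => calcBRelax (du + 1) nw p.2

-- one round: `new = dict(dist)` then the items loop
def calcBRound (gd : PySem.Dict Int (List Int)) (dist : PySem.Dict Int Int) :
    PySem.Dict Int Int :=
  gd.items.foldl (calcBItem dist) dist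

-- `for _ in range(N): … if new == dist: break; dist = new` — Python's dict == ignores
-- insertion order, but `new` is built from `dist` by in-place overwrites and appends, so
-- map-equality coincides with items-list equality `=` here.
def calcBRounds (gd : PySem.Dict Int (List Int)) : Nat → PySem.Dict Int Int → PySem.Dict Int Int
  | 0, dist => dist
  | k+1, dist =>
    let d' := calcBRound gd dist
    if d' = dist then dist else calcBRounds gd k d'

-- `if 0 in vs and u in dist: c = dist[u] + 1; if best == -1 or c < best: best = c`
def calcBBest1 (dist : PySem.Dict Int Int) (best : Int) (p : Int × List Int) : Int :=
  if (0:Int) ∈ p.2 then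
    match dist.get? p.1 with
    | some du => if best = -1 ∨ du + 1 < best then du + 1 else best
    | none => best
  else best

-- final scan: `best = -1; for u, vs in graph.items(): …`
def calcBBest (dist : PySem.Dict Int Int) (items : List (Int × List Int)) : Int :=
  items.foldl (calcBBest1 dist) (-1)

def calc_py_alt (N : Int) (graph : List (Int × List Int)) : Int :=
  let gd := PySem.Dict.ofList graph
  let dist := calcBRounds gd N.toNat (PySem.Dict.empty.insert 0 0)
  calcBBest dist gd.items

-- ===== PRECONDITION & SPEC =====
-- Pre_ admits every graph whose 0-row is absent or empty (the search visits nothing, no memo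
-- cell is touched, both programs return -1) and otherwise restricts to the natural domain of a
-- graph on the N nodes 0..N-1: every listed edge target lies in [0, N).  Outside that, A raises
-- IndexError on a reached target ≥ N or < -N, silently wraps a reached negative in-range target
-- (it indexes the memo list with the raw id), and returns normally only when the offending
-- targets happen to be unreachable from 0.
def Pre_calc_py (N : Int) (graph : List (Int × List Int)) : Prop :=
  (∀ p ∈ graph, p.1 = 0 → p.2 = []) ∨ (∀ p ∈ graph, ∀ g ∈ p.2, 0 ≤ g ∧ g < N)
instance (N : Int) (graph : List (Int × List Int)) : Decidable (Pre_calc_py N graph) := by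
  unfold Pre_calc_py; infer_instance

def pvWitness_calc_py : Int × (List (Int × List Int)) := (3, [(0, [1, 2]), (1, [2]), (2, [0])])

def Spec_calc_py (N : Int) (graph : List (Int × List Int)) (out : Int) : Prop := out = calc_py_alt N graph
instance (N : Int) (graph : List (Int × List Int)) (out : Int) : Decidable (Spec_calc_py N graph out) := by unfold Spec_calc_py; infer_instance

-- ===== CLAIM (what is proved, stated in full; the proofs are below) =====
def Claim_equal_calc_py : Prop := ∀ (N : Int) (graph : List (Int × List Int)), Dom_calc_py N graph → Pre_calc_py N graph → Spec_calc_py N graph (calc_py N graph)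

-- ===== LEMMAS AND PROOFS =====

-- adjacency as both ports read it
def adjD (gd : PySem.Dict Int (List Int)) (u : Int) : List Int := gd.getD u []

-- every adjacency list stored in the dict has targets in [0, N)
def GdRange (N : Int) (gd : PySem.Dict Int (List Int)) : Prop :=
  ∀ u g, g ∈ adjD gd u → 0 ≤ g ∧ g < N

-- "there is a walk of length k from node 0 to u"
def reachA (gd : PySem.Dict Int (List Int)) : Nat → Int → Prop
  | 0, u => u = 0
  | k+1, v => ∃ u, reachA gd k u ∧ v ∈ adjD gd u

-- "the BFS level of u is exactly k"
def isLvl (gd : PySem.Dict Int (List Int)) (k : Nat) (u : Int) : Prop :=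
  reachA gd k u ∧ ∀ j < k, ¬ reachA gd j u

-- "m is the length of the shortest positive walk 0 → 0"
def HitAt (gd : PySem.Dict Int (List Int)) (m : Nat) : Prop :=
  1 ≤ m ∧ reachA gd m 0 ∧ ∀ j, 1 ≤ j → j < m → ¬ reachA gd j 0

-- memo lookup as A performs it
def memoAt (memo : List Bool) (g : Int) : Bool := PySem.List.pyGetD memo g true

theorem get?_update_mem {κ ν : Type} [BEq κ] [LawfulBEq κ]
    (ps : List (κ × ν)) (d : PySem.Dict κ ν) (k : κ) (v : ν)
    (h : (d.update ps).get? k = some v) : (k, v) ∈ ps ∨ d.get? k = some v := by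
  induction ps generalizing d with
  | nil => exact Or.inr h
  | cons p t ih =>
    have h' : ((d.insert p.1 p.2).update t).get? k = some v := h
    rcases ih _ h' with hm | hg
    · exact Or.inl (List.mem_cons_of_mem _ hm)
    · by_cases hk : k = p.1
      · subst hk
        rw [PySem.Dict.get?_insert_self] at hg
        cases hg
        exact Or.inl (by simp)
      · right
        rwa [PySem.Dict.get?_insert_of_ne (hne := hk)] at hg

theorem gdRange_of_pre (N : Int) (graph : List (Int × List Int))
    (hpre : ∀ p ∈ graph, ∀ g ∈ p.2, 0 ≤ g ∧ g < N) : GdRange N (PySem.Dict.ofList graph) := by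
  intro u g hg
  unfold adjD at hg
  cases hu : (PySem.Dict.ofList graph).get? u with
  | none =>
    rw [PySem.Dict.getD_eq_get?_getD, hu] at hg
    simp at hg
  | some l =>
    rw [PySem.Dict.getD_eq_get?_getD, hu] at hg
    rcases get?_update_mem graph PySem.Dict.empty u l hu with hm | he
    · exact hpre _ hm g hg
    · simp [PySem.Dict.get?_empty] at he

-- basic level lemmas
theorem lvl_unique (gd : PySem.Dict Int (List Int)) (k j : Nat) (u : Int)
    (hk : isLvl gd k u) (hj : isLvl gd j u) : k = j := by
  rcases hk with ⟨hk1, hk2⟩; rcases hj with ⟨hj1, hj2⟩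
  by_contra hne
  rcases Nat.lt_or_ge k j with h | h
  · exact hj2 k h hk1
  · exact hk2 j (by omega) hj1

theorem exact_pred (gd : PySem.Dict Int (List Int)) (k : Nat) (v : Int)
    (h : isLvl gd (k+1) v) : ∃ u, isLvl gd k u ∧ v ∈ adjD gd u := by
  rcases h with ⟨h1, h2⟩
  rcases h1 with ⟨u, hu, hv⟩
  refine ⟨u, ⟨hu, ?_⟩, hv⟩
  intro j hj hr
  exact h2 (j+1) (by omega) ⟨u, hr, hv⟩

theorem lvl_mono (gd : PySem.Dict Int (List Int)) (k : Nat)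
    (h : ∃ v, isLvl gd k v) : ∀ j ≤ k, ∃ v, isLvl gd j v := by
  induction k with
  | zero => intro j hj; interval_cases j; exact h
  | succ k ih =>
    intro j hj
    rcases h with ⟨v, hv⟩
    rcases exact_pred gd k v hv with ⟨u, hu, _⟩
    rcases Nat.lt_or_ge j (k+1) with hlt | hge
    · exact ih ⟨u, hu⟩ j (by omega)
    · have : j = k+1 := by omega
      subst this; exact ⟨v, hv⟩

theorem reach_has_lvl (gd : PySem.Dict Int (List Int)) (k : Nat) (u : Int)
    (h : reachA gd k u) : ∃ j ≤ k, isLvl gd j u := by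
  induction k using Nat.strong_induction_on with
  | _ k ih =>
    by_cases hmin : ∀ j < k, ¬ reachA gd j u
    · exact ⟨k, le_rfl, h, hmin⟩
    · push_neg at hmin
      rcases hmin with ⟨j, hj, hr⟩
      rcases ih j hj hr with ⟨j', hj', hl⟩
      exact ⟨j', by omega, hl⟩

theorem target_range (N : Int) (gd : PySem.Dict Int (List Int)) (hgd : GdRange N gd)
    (k : Nat) (u : Int) (h : reachA gd (k+1) u) : 0 ≤ u ∧ u < N := by
  rcases h with ⟨w, _, hu⟩
  exact hgd w u hu

theorem lvl_pos_ne_zero (gd : PySem.Dict Int (List Int)) (k : Nat) (u : Int)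
    (h : isLvl gd k u) (hk : 1 ≤ k) : u ≠ 0 := by
  intro h0
  subst h0
  exact h.2 0 (by omega) rfl

-- pigeonhole: the nonempty levels 1..k hold distinct nodes of [1, N), so k < N
theorem levels_bound (N : Int) (gd : PySem.Dict Int (List Int)) (hgd : GdRange N gd)
    (k : Nat) (u : Int) (h : isLvl gd k u) (hk : 1 ≤ k) : (k : Int) < N := by
  by_contra hN
  push_neg at hN
  have hex : ∀ j ∈ Finset.Icc 1 k, ∃ v, isLvl gd j v := by
    intro j hj
    rw [Finset.mem_Icc] at hj
    exact lvl_mono gd k ⟨u, h⟩ j hj.2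
  classical
  let f : Nat → Int := fun j => if hj : ∃ v, isLvl gd j v then hj.choose else 0
  have hf : ∀ j ∈ Finset.Icc 1 k, isLvl gd j (f j) := by
    intro j hj
    have hj' := hex j hj
    simp only [f, dif_pos hj']
    exact hj'.choose_spec
  have hmaps : ∀ j ∈ Finset.Icc 1 k, f j ∈ Finset.Ico (1:Int) N := by
    intro j hj
    have hl := hf j hj
    rw [Finset.mem_Icc] at hj
    obtain ⟨j', rfl⟩ : ∃ j', j = j' + 1 := ⟨j - 1, by omega⟩
    have hr := target_range N gd hgd j' (f (j'+1)) hl.1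
    have hne := lvl_pos_ne_zero gd (j'+1) (f (j'+1)) hl (by omega)
    rw [Finset.mem_Ico]
    omega
  have hinj : Set.InjOn f (Finset.Icc 1 k) := by
    intro a ha b hb hab
    have hla := hf a (by simpa using ha)
    have hlb := hf b (by simpa using hb)
    rw [hab] at hla
    exact lvl_unique gd a b (f b) hla hlb
  have hcard := Finset.card_le_card_of_injOn f hmaps hinj
  rw [Nat.card_Icc, Int.card_Ico] at hcard
  omega

theorem hit_unique (gd : PySem.Dict Int (List Int)) (m m' : Nat)
    (h : HitAt gd m) (h' : HitAt gd m') : m = m' := by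
  by_contra hne
  rcases Nat.lt_or_ge m m' with hlt | hge
  · exact h'.2.2 m h.1 hlt h.2.1
  · exact h.2.2 m' h'.1 (by omega) h'.2.1

theorem hit_exists (gd : PySem.Dict Int (List Int)) (k : Nat) (hk : 1 ≤ k)
    (h : reachA gd k 0) : ∃ m, HitAt gd m := by
  induction k using Nat.strong_induction_on with
  | _ k ih =>
    by_cases hmin : ∀ j, 1 ≤ j → j < k → ¬ reachA gd j 0
    · exact ⟨k, hk, h, hmin⟩
    · push_neg at hmin
      rcases hmin with ⟨j, hj1, hj2, hr⟩
      exact ih j hj2 hj1 hr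

theorem hit_pred (gd : PySem.Dict Int (List Int)) (m : Nat) (h : HitAt gd m) :
    ∃ u, isLvl gd (m-1) u ∧ (0:Int) ∈ adjD gd u := by
  rcases h with ⟨hm, hr, hmin⟩
  obtain ⟨m', rfl⟩ : ∃ m', m = m' + 1 := ⟨m - 1, by omega⟩
  rcases hr with ⟨u, hu, h0⟩
  refine ⟨u, ⟨by simpa using hu, ?_⟩, by simpa using h0⟩
  intro j hj hrj
  exact hmin (j+1) (by omega) (by omega) ⟨u, hrj, h0⟩

theorem hit_bound (N : Int) (gd : PySem.Dict Int (List Int)) (hgd : GdRange N gd)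
    (m : Nat) (h : HitAt gd m) : (m : Int) ≤ N := by
  rcases hit_pred gd m h with ⟨u, hu, h0⟩
  have hm := h.1
  rcases Nat.lt_or_ge m 2 with h2 | h2
  · have hm1 : m = 1 := by omega
    have : (0:Int) ≤ 0 ∧ (0:Int) < N := hgd u 0 h0
    omega
  · have h1 : 1 ≤ m - 1 := by omega
    have := levels_bound N gd hgd (m-1) u hu h1
    omega

-- ========== A side ==========

-- intermediate state of one whole-level fold: mem' = memo with exactly S newly marked
def MemS (memo mem' : List Bool) (S : List Int) : Prop :=
  mem'.length = memo.length ∧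
  ∀ g : Int, 0 ≤ g → memoAt mem' g = (memoAt memo g || decide (g ∈ S))

def SRange (N : Int) (memo : List Bool) (S : List Int) : Prop :=
  ∀ v ∈ S, 0 ≤ v ∧ v < N ∧ memoAt memo v = false

-- A's loop invariant at counter r
def InvA (N : Int) (gd : PySem.Dict Int (List Int)) (r : Nat)
    (memo : List Bool) (nodes : List Int) : Prop :=
  memo.length = N.toNat ∧
  (∀ g : Int, 0 ≤ g → g < N →
    (memoAt memo g = true ↔ (g ≠ 0 ∧ ∃ j ≤ r, reachA gd j g))) ∧
  (∀ v : Int, v ∈ nodes ↔ isLvl gd r v)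

def NoHit (gd : PySem.Dict Int (List Int)) (r : Nat) : Prop :=
  ∀ j, 1 ≤ j → j ≤ r → ¬ reachA gd j 0

theorem memoAt_nonneg (memo : List Bool) (g : Int) (h0 : 0 ≤ g) :
    memoAt memo g = (memo[g.toNat]?).getD true := by
  rw [memoAt, PySem.List.pyGetD, PySem.List.pyGet?_of_nonneg memo h0]

theorem inner_fold (N : Int) (memo : List Bool) (hlen : memo.length = N.toNat)
    (gh : List Int) (hgh : ∀ g ∈ gh, 0 ≤ g ∧ g < N) :
    ∀ (mem : List Bool) (S : List Int), MemS memo mem S → SRange N memo S →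
    MemS memo (gh.foldl calcAStep (mem, S)).1 (gh.foldl calcAStep (mem, S)).2 ∧
    SRange N memo (gh.foldl calcAStep (mem, S)).2 ∧
    (∀ v, v ∈ (gh.foldl calcAStep (mem, S)).2 ↔ v ∈ S ∨ (v ∈ gh ∧ memoAt memo v = false)) := by
  induction gh with
  | nil =>
    intro mem S h1 h2
    exact ⟨h1, h2, fun v => by simp⟩
  | cons g t ih =>
    intro mem S h1 h2
    have hg := hgh g (by simp)
    have hght : ∀ x ∈ t, 0 ≤ x ∧ x < N := fun x hx => hgh x (by simp [hx])
    have hmg : memoAt mem g = (memoAt memo g || decide (g ∈ S)) := h1.2 g hg.1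
    simp only [List.foldl_cons]
    by_cases hskip : memoAt mem g = true
    · have hstep : calcAStep (mem, S) g = (mem, S) := by
        unfold calcAStep
        rw [show PySem.List.pyGetD mem g true = true from hskip]
        simp
      rw [hstep]
      obtain ⟨i1, i2, i3⟩ := ih hght mem S h1 h2
      refine ⟨i1, i2, ?_⟩
      intro v
      rw [i3 v]
      constructor
      · rintro (hv | ⟨hv1, hv2⟩)
        · exact Or.inl hv
        · exact Or.inr ⟨by simp [hv1], hv2⟩
      · rintro (hv | ⟨hv1, hv2⟩)
        · exact Or.inl hv
        · rcases List.mem_cons.1 hv1 with hv1 | hv1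
          · subst hv1
            rw [hmg, hv2] at hskip
            simp at hskip
            exact Or.inl hskip
          · exact Or.inr ⟨hv1, hv2⟩
    · have hskip' : memoAt mem g = false := by simpa using hskip
      rw [hmg] at hskip'
      simp only [Bool.or_eq_false_iff, decide_eq_false_iff_not] at hskip'
      obtain ⟨hgm, hgS⟩ := hskip'
      have hstep : calcAStep (mem, S) g = (mem.set g.toNat true, S ++ [g]) := by
        unfold calcAStep
        rw [show PySem.List.pyGetD mem g true = false from by rw [show PySem.List.pyGetD mem g true = memoAt mem g from rfl, hmg, hgm]; simp [hgS]]
        rw [PySem.List.pySetD_of_nonneg mem true hg.1]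
        simp [PySem.Set.add_of_not_mem hgS]
    
      rw [hstep]
      have hglen : g.toNat < mem.length := by
        rw [h1.1, hlen]
        omega
      have h1' : MemS memo (mem.set g.toNat true) (S ++ [g]) := by
        refine ⟨by rw [List.length_set]; exact h1.1, ?_⟩
        intro x hx
        rw [memoAt_nonneg _ _ hx, List.getElem?_set]
        by_cases hxg : x = g
        · subst hxg
          rw [if_pos rfl, if_pos hglen]
          simp
        · have hne : g.toNat ≠ x.toNat := by omega
          rw [if_neg hne, ← memoAt_nonneg _ _ hx, h1.2 x hx]
          have : (x ∈ S ++ [g]) ↔ x ∈ S := by simp [hxg]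
          simp [this]
      have h2' : SRange N memo (S ++ [g]) := by
        intro v hv
        rcases List.mem_append.1 hv with hv | hv
        · exact h2 v hv
        · rw [List.mem_singleton.1 hv]
          exact ⟨hg.1, hg.2, hgm⟩
      obtain ⟨i1, i2, i3⟩ := ih hght (mem.set g.toNat true) (S ++ [g]) h1' h2'
      refine ⟨i1, i2, ?_⟩
      intro v
      rw [i3 v]
      constructor
      · rintro (hv | ⟨hv1, hv2⟩)
        · rcases List.mem_append.1 hv with hv | hv
          · exact Or.inl hv
          · rw [List.mem_singleton.1 hv]
            exact Or.inr ⟨by simp, hgm⟩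
        · exact Or.inr ⟨by simp [hv1], hv2⟩
      · rintro (hv | ⟨hv1, hv2⟩)
        · exact Or.inl (by simp [hv])
        · rcases List.mem_cons.1 hv1 with hv1 | hv1
          · subst hv1
            exact Or.inl (by simp)
          · exact Or.inr ⟨hv1, hv2⟩

theorem node_fold (N : Int) (gd : PySem.Dict Int (List Int)) (hgd : GdRange N gd)
    (memo : List Bool) (hlen : memo.length = N.toNat) :
    ∀ (ns : List Int) (mem : List Bool) (S : List Int), MemS memo mem S → SRange N memo S →
    MemS memo (ns.foldl (calcANode gd) (mem, S)).1 (ns.foldl (calcANode gd) (mem, S)).2 ∧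
    SRange N memo (ns.foldl (calcANode gd) (mem, S)).2 ∧
    (∀ v, v ∈ (ns.foldl (calcANode gd) (mem, S)).2 ↔
      v ∈ S ∨ (∃ u ∈ ns, v ∈ adjD gd u ∧ memoAt memo v = false)) := by
  intro ns
  induction ns with
  | nil =>
    intro mem S h1 h2
    refine ⟨h1, h2, fun v => by simp⟩
  | cons u t ih =>
    intro mem S h1 h2
    have hadj : ∀ g ∈ adjD gd u, 0 ≤ g ∧ g < N := fun g hg => hgd u g hg
    simp only [List.foldl_cons]
    have hnode : calcANode gd (mem, S) u = (adjD gd u).foldl calcAStep (mem, S) := rfl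
    rw [hnode]
    obtain ⟨i1, i2, i3⟩ := inner_fold N memo hlen (adjD gd u) hadj mem S h1 h2
    rcases hsplit : (adjD gd u).foldl calcAStep (mem, S) with ⟨mem1, S1⟩
    rw [hsplit] at i1 i2 i3
    obtain ⟨j1, j2, j3⟩ := ih mem1 S1 i1 i2
    refine ⟨j1, j2, ?_⟩
    intro v
    rw [j3 v]
    constructor
    · rintro (hv | ⟨w, hw1, hw2, hw3⟩)
      · rcases (i3 v).1 hv with hv | ⟨hv1, hv2⟩
        · exact Or.inl hv
        · exact Or.inr ⟨u, by simp, hv1, hv2⟩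
      · exact Or.inr ⟨w, by simp [hw1], hw2, hw3⟩
    · rintro (hv | ⟨w, hw1, hw2, hw3⟩)
      · exact Or.inl ((i3 v).2 (Or.inl hv))
      · rcases List.mem_cons.1 hw1 with hw1 | hw1
        · subst hw1
          exact Or.inl ((i3 v).2 (Or.inr ⟨hw2, hw3⟩))
        · exact Or.inr ⟨w, hw1, hw2, hw3⟩

-- one iteration of A's while-loop, characterized
theorem a_step (N : Int) (gd : PySem.Dict Int (List Int)) (hgd : GdRange N gd)
    (r : Nat) (memo : List Bool) (nodes : List Int)
    (hinv : InvA N gd r memo nodes) (hnh : NoHit gd r) :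
    ((0:Int) ∈ (nodes.foldl (calcANode gd) (memo, (PySem.Set.empty : PySem.Set Int))).2
       ∧ HitAt gd (r+1)) ∨
    ((0:Int) ∉ (nodes.foldl (calcANode gd) (memo, (PySem.Set.empty : PySem.Set Int))).2
       ∧ ¬ HitAt gd (r+1)
       ∧ InvA N gd (r+1) (nodes.foldl (calcANode gd) (memo, (PySem.Set.empty : PySem.Set Int))).1
           (nodes.foldl (calcANode gd) (memo, (PySem.Set.empty : PySem.Set Int))).2
       ∧ NoHit gd (r+1)) := by
  obtain ⟨hlen, hmemo, hnodes⟩ := hinv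
  have hMS : MemS memo memo (PySem.Set.empty : PySem.Set Int) :=
    ⟨rfl, fun g _ => by simp [PySem.Set.empty]⟩
  have hSR : SRange N memo (PySem.Set.empty : PySem.Set Int) := by
    intro v hv
    simp [PySem.Set.empty] at hv
  obtain ⟨f1, f2, f3⟩ :=
    node_fold N gd hgd memo hlen nodes memo (PySem.Set.empty : PySem.Set Int) hMS hSR
  have K : ∀ v, v ∈ (nodes.foldl (calcANode gd) (memo, (PySem.Set.empty : PySem.Set Int))).2 ↔
      ∃ u, isLvl gd r u ∧ v ∈ adjD gd u ∧ memoAt memo v = false := by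
    intro v
    rw [f3 v]
    constructor
    · rintro (hv | ⟨u, hu1, hu2, hu3⟩)
      · simp [PySem.Set.empty] at hv
      · exact ⟨u, (hnodes u).1 hu1, hu2, hu3⟩
    · rintro ⟨u, hu1, hu2, hu3⟩
      exact Or.inr ⟨u, (hnodes u).2 hu1, hu2, hu3⟩
  by_cases h0 : (0:Int) ∈ (nodes.foldl (calcANode gd) (memo, (PySem.Set.empty : PySem.Set Int))).2
  · left
    refine ⟨h0, ?_⟩
    rcases (K 0).1 h0 with ⟨u, hu1, hu2, _⟩
    exact ⟨by omega, ⟨u, hu1.1, hu2⟩, fun j hj1 hj2 => hnh j hj1 (by omega)⟩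
  · right
    have hnothit : ¬ HitAt gd (r+1) := by
      intro hhit
      rcases hit_pred gd (r+1) hhit with ⟨u, hu1, hu2⟩
      have hu1' : isLvl gd r u := by simpa using hu1
      have hrange := hgd u 0 hu2
      have hm0 : memoAt memo 0 = false := by
        have := hmemo 0 le_rfl hrange.2
        cases hb : memoAt memo 0 with
        | false => rfl
        | true => exact absurd (this.1 hb).1 (by simp)
      exact h0 ((K 0).2 ⟨u, hu1', hu2, hm0⟩)
    have hnh' : NoHit gd (r+1) := by
      intro j hj1 hj2 hr
      rcases Nat.lt_or_ge j (r+1) with hlt | hge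
      · exact hnh j hj1 (by omega) hr
      · have hj : j = r+1 := by omega
        subst hj
        exact hnothit ⟨hj1, hr, fun i hi1 hi2 => hnh i hi1 (by omega)⟩
    refine ⟨h0, hnothit, ⟨by rw [f1.1]; exact hlen, ?_, ?_⟩, hnh'⟩
    · intro g hg0 hgN
      rw [f1.2 g hg0]
      constructor
      · intro htrue
        rcases Bool.or_eq_true_iff.1 htrue with hold | hnew
        · rcases (hmemo g hg0 hgN).1 hold with ⟨hne, j, hj, hr⟩
          exact ⟨hne, j, by omega, hr⟩
        · rw [decide_eq_true_iff] at hnew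
          rcases (K g).1 hnew with ⟨u, hu1, hu2, _⟩
          have hgne : g ≠ 0 := by
            intro hg
            subst hg
            exact h0 hnew
          exact ⟨hgne, r+1, le_rfl, ⟨u, hu1.1, hu2⟩⟩
      · rintro ⟨hne, j, hj, hr⟩
        by_cases hold : memoAt memo g = true
        · rw [hold]; simp
        · have holdf : memoAt memo g = false := by simpa using hold
          have hnor : ¬ ∃ j ≤ r, reachA gd j g := by
            intro hex
            exact hold ((hmemo g hg0 hgN).2 ⟨hne, hex⟩)
          have hj' : j = r + 1 := by
            rcases Nat.lt_or_ge j (r+1) with hlt | hge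
            · exact absurd ⟨j, by omega, hr⟩ hnor
            · omega
          subst hj'
          have hlvl : isLvl gd (r+1) g :=
            ⟨hr, fun i hi hri => hnor ⟨i, by omega, hri⟩⟩
          rcases exact_pred gd r g hlvl with ⟨u, hu1, hu2⟩
          have : g ∈ (nodes.foldl (calcANode gd) (memo, (PySem.Set.empty : PySem.Set Int))).2 :=
            (K g).2 ⟨u, hu1, hu2, holdf⟩
          simp only [Bool.or_eq_true, decide_eq_true_iff]
          exact Or.inr this
    · intro v
      rw [K v]
      constructor
      · rintro ⟨u, hu1, hu2, hu3⟩
        have hvne : v ≠ 0 := by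
          intro hv
          subst hv
          exact h0 ((K 0).2 ⟨u, hu1, hu2, hu3⟩)
        have hrange := hgd u v hu2
        have hnor : ¬ ∃ j ≤ r, reachA gd j v := by
          intro hex
          have := (hmemo v hrange.1 hrange.2).2 ⟨hvne, hex⟩
          rw [hu3] at this
          cases this
        exact ⟨⟨u, hu1.1, hu2⟩, fun i hi hri => hnor ⟨i, by omega, hri⟩⟩
      · intro hlvl
        rcases exact_pred gd r v hlvl with ⟨u, hu1, hu2⟩
        have hrange := hgd u v hu2
        have hm : memoAt memo v = false := by
          cases hb : memoAt memo v with
          | false => rfl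
          | true =>
            rcases (hmemo v hrange.1 hrange.2).1 hb with ⟨_, j, hj, hr⟩
            exact absurd hr (hlvl.2 j (by omega))
        exact ⟨u, hu1, hu2, hm⟩

theorem a_run_hit (N : Int) (gd : PySem.Dict Int (List Int)) (hgd : GdRange N gd) (m : Nat)
    (hm : HitAt gd m) :
    ∀ (fuel r : Nat) (memo : List Bool) (nodes : List Int),
    InvA N gd r memo nodes → NoHit gd r → r < m → m ≤ fuel + r →
    calcALoop gd fuel memo nodes (r : Int) = (m : Int) := by
  intro fuel
  induction fuel with
  | zero =>
    intro r memo nodes _ _ hrm hfuel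
    exact absurd hfuel (by omega)
  | succ fuel ih =>
    intro r memo nodes hinv hnh hrm hfuel
    rcases hit_pred gd m hm with ⟨u, hu, _⟩
    obtain ⟨v, hv⟩ := lvl_mono gd (m-1) ⟨u, hu⟩ r (by omega)
    have hvnodes : v ∈ nodes := (hinv.2.2 v).2 hv
    have hne : nodes ≠ [] := by
      intro h
      rw [h] at hvnodes
      simp at hvnodes
    simp only [calcALoop, if_neg hne]
    rcases a_step N gd hgd r memo nodes hinv hnh with ⟨h0, hhit⟩ | ⟨h0, _, hinv', hnh'⟩
    · rw [(PySem.Set.contains_iff _ _).2 h0]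
      simp only [if_pos]
      have : m = r + 1 := hit_unique gd m (r+1) hm hhit
      subst this
      push_cast
      ring
    · have hcont : PySem.Set.contains
          (nodes.foldl (calcANode gd) (memo, (PySem.Set.empty : PySem.Set Int))).2 0 = false := by
        cases hb : PySem.Set.contains
            (nodes.foldl (calcANode gd) (memo, (PySem.Set.empty : PySem.Set Int))).2 0 with
        | false => rfl
        | true => exact absurd ((PySem.Set.contains_iff _ _).1 hb) h0
      rw [hcont]
      simp only [Bool.false_eq_true, if_false]
      have hrm' : r + 1 < m := by
        rcases Nat.lt_or_ge (r+1) m with h | h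
        · exact h
        · have : m = r + 1 := by omega
          subst this
          exact absurd hm (by assumption)
      have := ih (r+1) _ _ hinv' hnh' hrm' (by omega)
      rw [show ((r:Int) + 1) = ((r+1 : Nat) : Int) from by push_cast; ring]
      exact this

theorem a_run_none (N : Int) (gd : PySem.Dict Int (List Int)) (hgd : GdRange N gd)
    (hnone : ∀ k, 1 ≤ k → ¬ reachA gd k 0) :
    ∀ (fuel r : Nat) (memo : List Bool) (nodes : List Int),
    InvA N gd r memo nodes →
    calcALoop gd fuel memo nodes (r : Int) = -1 := by
  intro fuel
  induction fuel with
  | zero => intro r memo nodes _; rfl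
  | succ fuel ih =>
    intro r memo nodes hinv
    by_cases hne : nodes = []
    · simp only [calcALoop, if_pos hne]
    · simp only [calcALoop, if_neg hne]
      have hnh : NoHit gd r := fun j h1 _ => hnone j h1
      rcases a_step N gd hgd r memo nodes hinv hnh with ⟨_, hhit⟩ | ⟨h0, _, hinv', _⟩
      · exact absurd hhit.2.1 (hnone (r+1) (by omega))
      · have hcont : PySem.Set.contains
            (nodes.foldl (calcANode gd) (memo, (PySem.Set.empty : PySem.Set Int))).2 0 = false := by
          cases hb : PySem.Set.contains
              (nodes.foldl (calcANode gd) (memo, (PySem.Set.empty : PySem.Set Int))).2 0 with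
          | false => rfl
          | true => exact absurd ((PySem.Set.contains_iff _ _).1 hb) h0
        rw [hcont]
        simp only [Bool.false_eq_true, if_false]
        have := ih (r+1) _ _ hinv'
        rw [show ((r:Int) + 1) = ((r+1 : Nat) : Int) from by push_cast; ring]
        exact this

theorem inv_init (N : Int) (gd : PySem.Dict Int (List Int)) :
    InvA N gd 0 (List.replicate N.toNat false) [0] := by
  refine ⟨by simp, ?_, ?_⟩
  · intro g h0 hN
    rw [memoAt_nonneg _ _ h0, List.getElem?_replicate]
    have : g.toNat < N.toNat := by omega
    simp only [this, if_pos]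
    constructor
    · intro hfalse; simp at hfalse
    · rintro ⟨hg0, j, hj, hr⟩
      interval_cases j
      exact (hg0 hr).elim
  · intro v
    constructor
    · intro hv
      rw [List.mem_singleton] at hv
      subst hv
      exact ⟨rfl, by omega⟩
    · intro hl
      have : v = 0 := hl.1
      simp [this]

-- ========== B side ==========

-- the distance table after round k: exactly the nodes of level ≤ k, mapped to their level
def JB (gd : PySem.Dict Int (List Int)) (k : Nat) (dist : PySem.Dict Int Int) : Prop :=
  (∀ u d, dist.get? u = some d → ∃ j : Nat, d = (j:Int) ∧ isLvl gd j u ∧ j ≤ k) ∧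
  (∀ u (j : Nat), isLvl gd j u → j ≤ k → dist.get? u = some (j:Int))

-- the fully relaxed table: exactly the reachable nodes, mapped to their level
def CompleteB (gd : PySem.Dict Int (List Int)) (dist : PySem.Dict Int Int) : Prop :=
  (∀ u d, dist.get? u = some d → ∃ j : Nat, d = (j:Int) ∧ isLvl gd j u) ∧
  (∀ u (j : Nat), isLvl gd j u → dist.get? u = some (j:Int))

theorem relax_mono (c : Int) :
    ∀ (vs : List Int) (nw : PySem.Dict Int Int) (v d : Int),
    nw.get? v = some d → ∃ d', (calcBRelax c nw vs).get? v = some d' ∧ d' ≤ d := by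
  intro vs
  induction vs with
  | nil => intro nw v d h; exact ⟨d, h, le_rfl⟩
  | cons w t ih =>
    intro nw v d h
    have hstep : ∃ d1, (calcBRelax1 c nw w).get? v = some d1 ∧ d1 ≤ d := by
      unfold calcBRelax1
      split_ifs with hcond
      · rw [PySem.Dict.get?_insert]
        by_cases hvw : v = w
        · subst hvw
          have hcont : nw.contains v = true := by
            rw [PySem.Dict.contains_eq_isSome_get?, h]
            rfl
          have hgd : nw.getD v 0 = d := PySem.Dict.getD_of_get?_eq_some nw 0 h
          rcases hcond with hc | hc
          · exact absurd hcont hc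
          · rw [hgd] at hc
            exact ⟨c, by simp, by omega⟩
        · rw [if_neg hvw]
          exact ⟨d, h, le_rfl⟩
      · exact ⟨d, h, le_rfl⟩
    rcases hstep with ⟨d1, h1, h2⟩
    rcases ih (calcBRelax1 c nw w) v d1 h1 with ⟨d', h3, h4⟩
    exact ⟨d', h3, by omega⟩

theorem relax_hit (c : Int) :
    ∀ (vs : List Int) (nw : PySem.Dict Int Int) (v : Int),
    v ∈ vs → ∃ d', (calcBRelax c nw vs).get? v = some d' ∧ d' ≤ c := by
  intro vs
  induction vs with
  | nil => intro nw v h; simp at h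
  | cons w t ih =>
    intro nw v h
    rcases List.mem_cons.1 h with hvw | hvt
    · subst hvw
      have hstep : ∃ d1, (calcBRelax1 c nw v).get? v = some d1 ∧ d1 ≤ c := by
        unfold calcBRelax1
        split_ifs with hcond
        · rw [PySem.Dict.get?_insert, if_pos rfl]
          exact ⟨c, rfl, le_rfl⟩
        · rw [not_or, not_not, not_lt] at hcond
          obtain ⟨hcont, hle⟩ := hcond
          rw [PySem.Dict.contains_eq_isSome_get?] at hcont
          cases hg : nw.get? v with
          | none => rw [hg] at hcont; cases hcont
          | some dv =>
            have : nw.getD v 0 = dv := PySem.Dict.getD_of_get?_eq_some nw 0 hg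
            rw [this] at hle
            exact ⟨dv, rfl, hle⟩
      rcases hstep with ⟨d1, h1, h2⟩
      rcases relax_mono c t (calcBRelax1 c nw v) v d1 h1 with ⟨d', h3, h4⟩
      exact ⟨d', h3, by omega⟩
    · exact ih (calcBRelax1 c nw w) v hvt

theorem relax_sound (c : Int) (P : Int → Int → Prop) :
    ∀ (vs : List Int) (nw : PySem.Dict Int Int),
    (∀ x d, nw.get? x = some d → P x d) → (∀ x ∈ vs, P x c) →
    ∀ x d, (calcBRelax c nw vs).get? x = some d → P x d := by
  intro vs
  induction vs with
  | nil => intro nw h _ x d hx; exact h x d hx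
  | cons w t ih =>
    intro nw h hc
    refine ih (calcBRelax1 c nw w) ?_ (fun x hx => hc x (by simp [hx]))
    intro x d hx
    unfold calcBRelax1 at hx
    split_ifs at hx with hcond
    · rw [PySem.Dict.get?_insert] at hx
      by_cases hxw : x = w
      · rw [if_pos hxw] at hx
        cases hx
        subst hxw
        exact hc x (by simp)
      · rw [if_neg hxw] at hx
        exact h x d hx
    · exact h x d hx

theorem item_mono (dist : PySem.Dict Int Int) :
    ∀ (L : List (Int × List Int)) (nw : PySem.Dict Int Int) (v d : Int),
    nw.get? v = some d → ∃ d', (L.foldl (calcBItem dist) nw).get? v = some d' ∧ d' ≤ d := by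
  intro L
  induction L with
  | nil => intro nw v d h; exact ⟨d, h, le_rfl⟩
  | cons p t ih =>
    intro nw v d h
    have hstep : ∃ d1, (calcBItem dist nw p).get? v = some d1 ∧ d1 ≤ d := by
      unfold calcBItem
      cases hp : dist.get? p.1 with
      | none => exact ⟨d, h, le_rfl⟩
      | some du => exact relax_mono (du+1) p.2 nw v d h
    rcases hstep with ⟨d1, h1, h2⟩
    rcases ih (calcBItem dist nw p) v d1 h1 with ⟨d', h3, h4⟩
    exact ⟨d', h3, by omega⟩

theorem item_hit (dist : PySem.Dict Int Int) :
    ∀ (L : List (Int × List Int)) (nw : PySem.Dict Int Int) (p : Int × List Int) (du v : Int),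
    p ∈ L → dist.get? p.1 = some du → v ∈ p.2 →
    ∃ d', (L.foldl (calcBItem dist) nw).get? v = some d' ∧ d' ≤ du + 1 := by
  intro L
  induction L with
  | nil => intro nw p du v h _ _; simp at h
  | cons q t ih =>
    intro nw p du v hmem hdu hv
    rcases List.mem_cons.1 hmem with hpq | hpt
    · subst hpq
      have hstep : calcBItem dist nw p = calcBRelax (du+1) nw p.2 := by
        unfold calcBItem
        rw [hdu]
      rcases relax_hit (du+1) p.2 nw v hv with ⟨d1, h1, h2⟩
      rw [← hstep] at h1
      rcases item_mono dist t (calcBItem dist nw p) v d1 h1 with ⟨d', h3, h4⟩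
      exact ⟨d', by simpa using h3, by omega⟩
    · exact ih (calcBItem dist nw q) p du v hpt hdu hv

theorem item_sound (dist : PySem.Dict Int Int) (P : Int → Int → Prop) :
    ∀ (L : List (Int × List Int)) (nw : PySem.Dict Int Int),
    (∀ x d, nw.get? x = some d → P x d) →
    (∀ p ∈ L, ∀ du, dist.get? p.1 = some du → ∀ x ∈ p.2, P x (du+1)) →
    ∀ x d, (L.foldl (calcBItem dist) nw).get? x = some d → P x d := by
  intro L
  induction L with
  | nil => intro nw h _ x d hx; exact h x d hx
  | cons p t ih =>
    intro nw h hP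
    refine ih (calcBItem dist nw p) ?_ (fun q hq => hP q (by simp [hq]))
    intro x d hx
    unfold calcBItem at hx
    cases hp : dist.get? p.1 with
    | none => rw [hp] at hx; exact h x d hx
    | some du =>
      rw [hp] at hx
      exact relax_sound (du+1) P p.2 nw h (hP p (by simp) du hp) x d hx

theorem jb_init (gd : PySem.Dict Int (List Int)) :
    JB gd 0 (PySem.Dict.empty.insert 0 0) := by
  constructor
  · intro u d hd
    rw [PySem.Dict.get?_insert] at hd
    split at hd
    · rename_i hu
      subst hu
      cases hd
      exact ⟨0, rfl, ⟨rfl, fun j hj => absurd hj (Nat.not_lt_zero j)⟩, le_rfl⟩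
    · rw [PySem.Dict.get?_empty] at hd; cases hd
  · intro u j hl hj
    interval_cases j
    have hu : u = 0 := hl.1
    subst hu
    rw [PySem.Dict.get?_insert_self]
    rfl

theorem jb_round (gd : PySem.Dict Int (List Int)) (hnd : gd.keys.Nodup)
    (k : Nat) (dist : PySem.Dict Int Int) (h : JB gd k dist) :
    JB gd (k+1) (calcBRound gd dist) := by
  obtain ⟨h1, h2⟩ := h
  have hsound : ∀ x d, (calcBRound gd dist).get? x = some d →
      ∃ j : Nat, d = (j:Int) ∧ reachA gd j x ∧ j ≤ k+1 := by
    refine item_sound dist _ gd.items dist ?_ ?_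
    · intro x d hx
      rcases h1 x d hx with ⟨j, hj1, hj2, hj3⟩
      exact ⟨j, hj1, hj2.1, by omega⟩
    · intro p hp du hdu x hx
      rcases h1 p.1 du hdu with ⟨j, hj1, hj2, hj3⟩
      have hadj : x ∈ adjD gd p.1 := by
        unfold adjD
        rw [PySem.Dict.getD_of_mem_items _ hp hnd]
        exact hx
      exact ⟨j+1, by push_cast [hj1]; ring, ⟨p.1, hj2.1, hadj⟩, by omega⟩
  have hcompl : ∀ u (j : Nat), isLvl gd j u → j ≤ k+1 →
      (calcBRound gd dist).get? u = some (j:Int) := by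
    intro u j hl hj
    rcases Nat.lt_or_ge j (k+1) with hlt | hge
    · have hd := h2 u j hl (by omega)
      rcases item_mono dist gd.items dist u _ hd with ⟨d', hd', hle⟩
      rcases hsound u d' hd' with ⟨j2, rfl, hr2, _⟩
      have hj2j : j ≤ j2 := by
        by_contra hcon
        exact hl.2 j2 (by omega) hr2
      have hji : j2 = j := by
        have : (j2:Int) ≤ (j:Int) := hle
        omega
      rw [hji] at hd'
      exact hd'
    · have hj' : j = k+1 := by omega
      subst hj'
      rcases exact_pred gd k u hl with ⟨w, hw, hadj⟩
      have hdw := h2 w k hw le_rfl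
      obtain ⟨l, hg, hu⟩ : ∃ l, gd.get? w = some l ∧ u ∈ l := by
        unfold adjD at hadj
        cases hg : gd.get? w with
        | none => rw [PySem.Dict.getD_eq_get?_getD, hg] at hadj; simp at hadj
        | some l => rw [PySem.Dict.getD_eq_get?_getD, hg] at hadj; exact ⟨l, rfl, hadj⟩
      have hitems : (w, l) ∈ gd.items := PySem.Dict.mem_items_of_get?_eq_some _ hg
      rcases item_hit dist gd.items dist (w, l) (k:Int) u hitems hdw hu with ⟨d', hd', hle⟩
      rcases hsound u d' hd' with ⟨j2, rfl, hr2, hj2⟩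
      have hge2 : k+1 ≤ j2 := by
        by_contra hcon
        exact hl.2 j2 (by omega) hr2
      have hji : j2 = k+1 := by omega
      rw [hji] at hd'
      exact hd'
  refine ⟨?_, hcompl⟩
  intro u d hd
  rcases hsound u d hd with ⟨j, rfl, hr, hj⟩
  rcases reach_has_lvl gd j u hr with ⟨j', hj', hl'⟩
  have h3 := hcompl u j' hl' (by omega)
  rw [hd] at h3
  have : ((j:Int)) = (j':Int) := Option.some.inj h3
  exact ⟨j', this, hl', by omega⟩

theorem rounds_complete (N : Int) (gd : PySem.Dict Int (List Int)) (hgd : GdRange N gd)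
    (hnd : gd.keys.Nodup) :
    ∀ (rounds k : Nat) (dist : PySem.Dict Int Int), JB gd k dist → N.toNat ≤ rounds + k →
    CompleteB gd (calcBRounds gd rounds dist) := by
  intro rounds
  induction rounds with
  | zero =>
    intro k dist hjb hk
    constructor
    · intro u d hd
      rcases hjb.1 u d hd with ⟨j, hj1, hj2, _⟩
      exact ⟨j, hj1, hj2⟩
    · intro u j hl
      refine hjb.2 u j hl ?_
      rcases Nat.eq_zero_or_pos j with h0 | h1
      · omega
      · have := levels_bound N gd hgd j u hl h1
        omega
  | succ rounds ih =>
    intro k dist hjb hk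
    have hnext : JB gd (k+1) (calcBRound gd dist) := jb_round gd hnd k dist hjb
    simp only [calcBRounds]
    by_cases heq : calcBRound gd dist = dist
    · rw [if_pos heq]
      rw [heq] at hnext
      constructor
      · intro u d hd
        rcases hjb.1 u d hd with ⟨j, hj1, hj2, _⟩
        exact ⟨j, hj1, hj2⟩
      · intro u j hl
        have hjk : j ≤ k := by
          by_contra hcon
          rcases lvl_mono gd j ⟨u, hl⟩ (k+1) (by omega) with ⟨v, hv⟩
          have hsome := hnext.2 v (k+1) hv le_rfl
          rcases hjb.1 v _ hsome with ⟨j2, hj2, hl2, hj2k⟩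
          have : j2 = k+1 := lvl_unique gd j2 (k+1) v hl2 hv
          omega
        exact hjb.2 u j hl hjk
    · rw [if_neg heq]
      exact ih (k+1) (calcBRound gd dist) hnext (by omega)

theorem foldl_id {α β : Type} (f : α → β → α) :
    ∀ (L : List β), (∀ p ∈ L, ∀ b, f b p = b) → ∀ b, L.foldl f b = b := by
  intro L
  induction L with
  | nil => intro _ b; rfl
  | cons p t ih =>
    intro h b
    rw [List.foldl_cons, h p (by simp) b]
    exact ih (fun q hq => h q (by simp [hq])) b

theorem best_none (gd : PySem.Dict Int (List Int)) (hnd : gd.keys.Nodup)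
    (dist : PySem.Dict Int Int)
    (hc : CompleteB gd dist) (hnone : ∀ k, 1 ≤ k → ¬ reachA gd k 0) :
    calcBBest dist gd.items = -1 := by
  unfold calcBBest
  apply foldl_id
  intro p hp b
  unfold calcBBest1
  split_ifs with h0
  · cases hdu : dist.get? p.1 with
    | none => rfl
    | some du =>
      rcases hc.1 p.1 du hdu with ⟨j, hj1, hj2⟩
      have hadj : (0:Int) ∈ adjD gd p.1 := by
        unfold adjD
        rw [PySem.Dict.getD_of_mem_items _ hp hnd]
        exact h0
      exact absurd ⟨p.1, hj2.1, hadj⟩ (hnone (j+1) (by omega))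
  · rfl

theorem best_fold (gd : PySem.Dict Int (List Int)) (hnd : gd.keys.Nodup)
    (dist : PySem.Dict Int Int) (hc : CompleteB gd dist) (m : Nat) (hm : HitAt gd m) :
    ∀ (L : List (Int × List Int)) (b : Int),
    (∀ p ∈ L, p ∈ gd.items) →
    ((∃ p ∈ L, (0:Int) ∈ p.2 ∧ dist.get? p.1 = some ((m:Int) - 1)) ∨ b = (m:Int)) →
    (b = -1 ∨ (m:Int) ≤ b) →
    L.foldl (calcBBest1 dist) b = (m:Int) := by
  intro L
  induction L with
  | nil =>
    intro b _ hwit _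
    rcases hwit with ⟨p, hp, _⟩ | hb
    · simp at hp
    · exact hb
  | cons p t ih =>
    intro b hsub hwit hlow
    simp only [List.foldl_cons]
    by_cases h0 : (0:Int) ∈ p.2
    · cases hdu : dist.get? p.1 with
      | none =>
        have hb' : calcBBest1 dist b p = b := by
          unfold calcBBest1
          rw [if_pos h0, hdu]
        rw [hb']
        refine ih _ (fun q hq => hsub q (by simp [hq])) ?_ hlow
        rcases hwit with ⟨q, hq, hq0, hqd⟩ | hb
        · rcases List.mem_cons.1 hq with hq | hq
          · subst hq
            rw [hdu] at hqd
            cases hqd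
          · exact Or.inl ⟨q, hq, hq0, hqd⟩
        · exact Or.inr hb
      | some du =>
        -- every candidate is at least m
        rcases hc.1 p.1 du hdu with ⟨j, hj1, hj2⟩
        have hadj : (0:Int) ∈ adjD gd p.1 := by
          unfold adjD
          rw [PySem.Dict.getD_of_mem_items _ (hsub p (by simp)) hnd]
          exact h0
        have hmle : (m:Int) ≤ du + 1 := by
          have hr : reachA gd (j+1) 0 := ⟨p.1, hj2.1, hadj⟩
          have : m ≤ j+1 := by
            by_contra hcon
            exact hm.2.2 (j+1) (by omega) (by omega) hr
          omega
        have hb' : calcBBest1 dist b p =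
            (if b = -1 ∨ du + 1 < b then du + 1 else b) := by
          unfold calcBBest1
          rw [if_pos h0, hdu]
        rw [hb']
        rcases hwit with ⟨q, hq, hq0, hqd⟩ | hb
        · rcases List.mem_cons.1 hq with hq | hq
          · -- p is the witness: the new best is exactly m
            subst hq
            rw [hdu] at hqd
            have hdum : du = (m:Int) - 1 := Option.some.inj hqd
            have : (if b = -1 ∨ du + 1 < b then du + 1 else b) = (m:Int) := by
              split_ifs with hcond
              · omega
              · rcases hlow with hb1 | hb1
                · exact absurd (Or.inl hb1) hcond
                · rw [not_or] at hcond
                  omega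
            rw [this]
            exact ih _ (fun q hq => hsub q (by simp [hq])) (Or.inr rfl)
              (Or.inr (by omega))
          · -- witness still ahead
            refine ih _ (fun q' hq' => hsub q' (by simp [hq'])) (Or.inl ⟨q, hq, hq0, hqd⟩) ?_
            split_ifs with hcond
            · exact Or.inr hmle
            · rw [not_or] at hcond
              rcases hlow with hb1 | hb1
              · exact absurd hb1 hcond.1
              · exact Or.inr hb1
        · -- b already equals m: it stays m
          subst hb
          have h1m := hm.1
          have hcondF : ¬ ((m:Int) = -1 ∨ du + 1 < (m:Int)) := by
            rintro (hc1 | hc1) <;> omega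
          rw [if_neg hcondF]
          exact ih _ (fun q hq => hsub q (by simp [hq])) (Or.inr rfl) (Or.inr le_rfl)
    · have hb' : calcBBest1 dist b p = b := by
        unfold calcBBest1
        rw [if_neg h0]
      rw [hb']
      refine ih _ (fun q hq => hsub q (by simp [hq])) ?_ hlow
      rcases hwit with ⟨q, hq, hq0, hqd⟩ | hb
      · rcases List.mem_cons.1 hq with hq | hq
        · subst hq
          exact absurd hq0 h0
        · exact Or.inl ⟨q, hq, hq0, hqd⟩
      · exact Or.inr hb

theorem best_hit (gd : PySem.Dict Int (List Int)) (hnd : gd.keys.Nodup)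
    (dist : PySem.Dict Int Int)
    (hc : CompleteB gd dist) (m : Nat) (hm : HitAt gd m) :
    calcBBest dist gd.items = (m : Int) := by
  rcases hit_pred gd m hm with ⟨u, hu, hadj⟩
  have hdw : dist.get? u = some ((m-1 : Nat) : Int) := hc.2 u (m-1) hu
  obtain ⟨l, hg, h0l⟩ : ∃ l, gd.get? u = some l ∧ (0:Int) ∈ l := by
    unfold adjD at hadj
    cases hg : gd.get? u with
    | none => rw [PySem.Dict.getD_eq_get?_getD, hg] at hadj; simp at hadj
    | some l => rw [PySem.Dict.getD_eq_get?_getD, hg] at hadj; exact ⟨l, rfl, hadj⟩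
  have hitems : (u, l) ∈ gd.items := PySem.Dict.mem_items_of_get?_eq_some _ hg
  unfold calcBBest
  refine best_fold gd hnd dist hc m hm gd.items (-1) (fun p hp => hp) ?_ (Or.inl rfl)
  refine Or.inl ⟨(u, l), hitems, h0l, ?_⟩
  rw [show ((u, l).1) = u from rfl, hdw, Nat.cast_sub hm.1]
  norm_num

-- ========== the 0-row-empty case ==========

theorem trivial_case (N : Int) (graph : List (Int × List Int))
    (h0 : ∀ p ∈ graph, p.1 = 0 → p.2 = []) :
    calc_py N graph = calc_py_alt N graph := by
  have hnd : (PySem.Dict.ofList graph).keys.Nodup := PySem.Dict.nodup_keys_ofList graph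
  have hval0 : ∀ l, (PySem.Dict.ofList graph).get? 0 = some l → l = [] := by
    intro l hl
    rcases get?_update_mem graph PySem.Dict.empty 0 l hl with hm | he
    · exact h0 _ hm rfl
    · simp [PySem.Dict.get?_empty] at he
  have hget0 : (PySem.Dict.ofList graph).getD 0 [] = [] := by
    cases hu : (PySem.Dict.ofList graph).get? 0 with
    | none => rw [PySem.Dict.getD_eq_get?_getD, hu]; rfl
    | some l =>
      rw [PySem.Dict.getD_eq_get?_getD, hu]
      exact hval0 l hu
  have hA : calc_py N graph = -1 := by
    show calcALoop (PySem.Dict.ofList graph) (N.toNat + 2)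
      (List.replicate N.toNat false) (PySem.Set.add PySem.Set.empty 0) 0 = -1
    rw [show PySem.Set.add PySem.Set.empty 0 = ([0] : List Int) from rfl,
      show N.toNat + 2 = N.toNat + 1 + 1 from rfl]
    simp [calcALoop, calcANode, hget0, PySem.Set.empty]
  have hB : calc_py_alt N graph = -1 := by
    have hkey : ∀ p du, (PySem.Dict.empty.insert (0:Int) (0:Int)).get? p = some du → p = 0 := by
      intro p du hp
      rw [PySem.Dict.get?_insert] at hp
      split at hp
      · assumption
      · rw [PySem.Dict.get?_empty] at hp; cases hp
    have hroundid : calcBRound (PySem.Dict.ofList graph) (PySem.Dict.empty.insert 0 0) =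
        PySem.Dict.empty.insert 0 0 := by
      unfold calcBRound
      apply foldl_id
      intro p hp nw
      unfold calcBItem
      cases hdu : (PySem.Dict.empty.insert (0:Int) (0:Int)).get? p.1 with
      | none => rfl
      | some du =>
        have hp1 : p.1 = 0 := hkey p.1 du hdu
        have hpval : (PySem.Dict.ofList graph).get? p.1 = some p.2 :=
          PySem.Dict.get?_of_mem_items _ hp hnd
        rw [hp1] at hpval
        have hp2 : p.2 = [] := hval0 p.2 hpval
        rw [hp2]
        rfl
    have hrounds : calcBRounds (PySem.Dict.ofList graph) N.toNat
        (PySem.Dict.empty.insert 0 0) = PySem.Dict.empty.insert 0 0 := by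
      cases hN : N.toNat with
      | zero => rfl
      | succ n =>
        simp only [calcBRounds, hroundid, if_pos]
    have hbest : calcBBest (PySem.Dict.empty.insert 0 0)
        (PySem.Dict.ofList graph).items = -1 := by
      unfold calcBBest
      apply foldl_id
      intro p hp b
      unfold calcBBest1
      split_ifs with hc0
      · cases hdu : (PySem.Dict.empty.insert (0:Int) (0:Int)).get? p.1 with
        | none => rfl
        | some du =>
          exfalso
          have hp1 : p.1 = 0 := hkey p.1 du hdu
          have hpval : (PySem.Dict.ofList graph).get? p.1 = some p.2 :=
            PySem.Dict.get?_of_mem_items _ hp hnd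
          rw [hp1] at hpval
          have hp2 : p.2 = [] := hval0 p.2 hpval
          rw [hp2] at hc0
          simp at hc0
      · rfl
    show calcBBest (calcBRounds (PySem.Dict.ofList graph) N.toNat
      (PySem.Dict.empty.insert 0 0)) (PySem.Dict.ofList graph).items = -1
    rw [hrounds, hbest]
  rw [hA, hB]

-- ===== VERDICT (by name: the statement is the Claim_ definition above) =====
theorem calc_py_spec : Claim_equal_calc_py := by
  intro N graph _hdom hpre
  unfold Spec_calc_py
  rcases hpre with hpre | hpre
  · exact trivial_case N graph hpre
  · have hgd := gdRange_of_pre N graph hpre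
    have hnd : (PySem.Dict.ofList graph).keys.Nodup := PySem.Dict.nodup_keys_ofList graph
    have hcompl := rounds_complete N (PySem.Dict.ofList graph) hgd hnd N.toNat 0
      (PySem.Dict.empty.insert 0 0) (jb_init (PySem.Dict.ofList graph)) (by omega)
    by_cases hex : ∃ k, 1 ≤ k ∧ reachA (PySem.Dict.ofList graph) k 0
    · rcases hex with ⟨k, hk1, hk2⟩
      rcases hit_exists (PySem.Dict.ofList graph) k hk1 hk2 with ⟨m, hm⟩
      have hbound := hit_bound N (PySem.Dict.ofList graph) hgd m hm
      have hA : calc_py N graph = (m : Int) := by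
        show calcALoop (PySem.Dict.ofList graph) (N.toNat + 2)
          (List.replicate N.toNat false) (PySem.Set.add PySem.Set.empty 0) 0 = (m : Int)
        rw [show PySem.Set.add PySem.Set.empty 0 = ([0] : List Int) from rfl,
          show (0 : Int) = ((0 : Nat) : Int) from rfl]
        exact a_run_hit N (PySem.Dict.ofList graph) hgd m hm (N.toNat + 2) 0
          (List.replicate N.toNat false) [0] (inv_init N (PySem.Dict.ofList graph))
          (fun j h1 h2 => absurd (le_trans h1 h2) (by omega))
          hm.1 (by have := hm.1; omega)
      have hB : calc_py_alt N graph = (m : Int) := by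
        show calcBBest (calcBRounds (PySem.Dict.ofList graph) N.toNat
          (PySem.Dict.empty.insert 0 0)) (PySem.Dict.ofList graph).items = (m : Int)
        exact best_hit (PySem.Dict.ofList graph) hnd _ hcompl m hm
      rw [hA, hB]
    · push_neg at hex
      have hnone : ∀ k, 1 ≤ k → ¬ reachA (PySem.Dict.ofList graph) k 0 := hex
      have hA : calc_py N graph = -1 := by
        show calcALoop (PySem.Dict.ofList graph) (N.toNat + 2)
          (List.replicate N.toNat false) (PySem.Set.add PySem.Set.empty 0) 0 = -1
        rw [show PySem.Set.add PySem.Set.empty 0 = ([0] : List Int) from rfl,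
          show (0 : Int) = ((0 : Nat) : Int) from rfl]
        exact a_run_none N (PySem.Dict.ofList graph) hgd hnone (N.toNat + 2) 0
          (List.replicate N.toNat false) [0] (inv_init N (PySem.Dict.ofList graph))
      have hB : calc_py_alt N graph = -1 := by
        show calcBBest (calcBRounds (PySem.Dict.ofList graph) N.toNat
          (PySem.Dict.empty.insert 0 0)) (PySem.Dict.ofList graph).items = -1
        exact best_none (PySem.Dict.ofList graph) hnd _ hcompl hnone
      rw [hA, hB]
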